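-- pv_equiv track=rewrite | github.com/maykon1313/Faculdade | 3_Semestre/Estrutura_de_Dados/Aulas/Aula_lab6.py | busca_ingenua
-- ===== SOURCE A (Python) =====
-- def busca_ingenua(texto, padrao):
--     n = len(texto)
--     m = len(padrao)
--     comparacoes = 0
--
--     for i in range(n - m + 1):
--         j = 0
--         while j < m:
--             comparacoes += 1
--             if texto[i+j] != padrao[j]:
--                 break
--             j += 1
--     return comparacoes
-- ===== SOURCE B (Python) =====
-- def busca_ingenua(texto, padrao):
--     # Column-wise elimination: process pattern position j across all surviving
--     # shifts at once; each shift contributes one comparison per round it survives into.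
--     n = len(texto)
--     m = len(padrao)
--     survivors = list(range(n - m + 1))
--     total = 0
--     for j in range(m):
--         total += len(survivors)
--         survivors = [i for i in survivors if texto[i + j] == padrao[j]]
--     return total
-- ===== Notes on version B (the rewrite author's own statement) =====
-- stated objective: alternative
-- what changed: B replaces A's row-wise shift-by-shift inner while loop with a column-wise sweep over pattern positions that keeps the list of surviving shifts and adds its size per round (double counting the same comparisons).
import Mathlib
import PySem

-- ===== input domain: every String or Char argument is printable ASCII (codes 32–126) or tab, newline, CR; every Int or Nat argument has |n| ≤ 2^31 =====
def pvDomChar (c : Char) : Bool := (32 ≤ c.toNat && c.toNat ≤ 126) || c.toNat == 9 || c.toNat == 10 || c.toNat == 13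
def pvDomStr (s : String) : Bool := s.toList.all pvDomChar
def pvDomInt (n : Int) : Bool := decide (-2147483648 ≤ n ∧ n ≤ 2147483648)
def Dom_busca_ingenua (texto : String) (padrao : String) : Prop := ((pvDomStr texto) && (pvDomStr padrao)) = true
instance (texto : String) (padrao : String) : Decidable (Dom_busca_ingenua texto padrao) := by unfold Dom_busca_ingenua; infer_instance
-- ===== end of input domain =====

-- B counts the same naive-search character comparisons column-wise (per pattern
-- position, filtering the surviving shifts) instead of A's row-wise shift-by-shift
-- scan; objective: alternative algorithm, same worst-case cost.

-- ===== PORT A =====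
-- inner 'while j < m' loop of A: counts one comparison per iteration, breaks on mismatch
def pvWhileA (t p : List Char) (m : Nat) (i : Int) (j : Nat) (acc : Int) : Int :=
  if _h : j < m then
    if PySem.List.pyGet? t (i + (j : Int)) != PySem.List.pyGet? p (j : Int) then acc + 1
    else pvWhileA t p m i (j + 1) (acc + 1)
  else acc
termination_by m - j

def busca_ingenua (texto : String) (padrao : String) : Int :=
  let t := texto.toList
  let p := padrao.toList
  let n := t.length
  let m := p.length
  (PySem.List.pyRange 0 ((n : Int) - (m : Int) + 1) 1).foldl
    (fun acc i => pvWhileA t p m i 0 acc) 0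

-- ===== PORT B =====
def busca_ingenua_alt (texto : String) (padrao : String) : Int :=
  let t := texto.toList
  let p := padrao.toList
  let n := t.length
  let m := p.length
  let res :=
    (PySem.List.pyRange 0 (m : Int) 1).foldl
      (fun st j =>
        (st.1 + (st.2.length : Int),
         st.2.filter (fun i => PySem.List.pyGet? t (i + j) == PySem.List.pyGet? p j)))
      (0, PySem.List.pyRange 0 ((n : Int) - (m : Int) + 1) 1)
  res.1

-- ===== PRECONDITION & SPEC =====
def Spec_busca_ingenua (texto : String) (padrao : String) (out : Int) : Prop := out = busca_ingenua_alt texto padrao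
instance (texto : String) (padrao : String) (out : Int) : Decidable (Spec_busca_ingenua texto padrao out) := by unfold Spec_busca_ingenua; infer_instance

-- ===== CLAIM (what is proved, stated in full; the proofs are below) =====
def Claim_equal_busca_ingenua : Prop := ∀ (texto : String) (padrao : String), Dom_busca_ingenua texto padrao → Spec_busca_ingenua texto padrao (busca_ingenua texto padrao)

-- ===== LEMMAS AND PROOFS =====

-- comparison of text position i+j against pattern position j (shared vocabulary of both proofs)
def pvE (t p : List Char) (i : Int) (j : Nat) : Bool :=
  PySem.List.pyGet? t (i + (j : Int)) == PySem.List.pyGet? p (j : Int)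

-- shift i still matches the pattern on all positions < j
def pvPref (t p : List Char) (i : Int) (j : Nat) : Bool :=
  (List.range j).all (pvE t p i)

lemma pvPref_succ (t p : List Char) (i : Int) (j : Nat) :
    pvPref t p i (j + 1) = (pvPref t p i j && pvE t p i j) := by
  simp [pvPref, List.range_succ]

lemma pvPref_of_lt_false (t p : List Char) (i : Int) {j a : Nat} (hja : j < a)
    (hE : pvE t p i j = false) : pvPref t p i a = false := by
  apply Bool.eq_false_iff.mpr
  intro h
  rw [pvPref, List.all_eq_true] at h
  have := h j (by simpa [List.mem_range] using hja)
  simp [hE] at this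

-- A's inner while loop counts exactly the positions j' whose whole prefix matches
lemma pvWhileA_eq (t p : List Char) (i : Int) (m : Nat) :
    ∀ (k j : Nat) (acc : Int), m - j = k → (∀ j' < j, pvE t p i j' = true) →
      pvWhileA t p m i j acc = acc + ((List.range' j k).countP (pvPref t p i) : Int) := by
  intro k
  induction k with
  | zero =>
    intro j acc hk _
    rw [pvWhileA, dif_neg (by omega)]
    simp
  | succ k ih =>
    intro j acc hk h
    have hj : j < m := by omega
    have hPref : pvPref t p i j = true := by
      simp only [pvPref, List.all_eq_true]
      intro j' hj'
      exact h j' (by simpa [List.mem_range] using hj')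
    rw [pvWhileA, dif_pos hj]
    rw [List.range'_succ, List.countP_cons]
    by_cases hE : pvE t p i j = true
    · have : (PySem.List.pyGet? t (i + (j : Int)) != PySem.List.pyGet? p (j : Int)) = false := by
        simpa [pvE, bne] using hE
      rw [this]
      simp only [Bool.false_eq_true, if_false]
      rw [ih (j + 1) (acc + 1) (by omega)
        (by intro j' hj'; rcases Nat.lt_succ_iff_lt_or_eq.mp hj' with h' | h'
            · exact h j' h'
            · subst h'; exact hE)]
      rw [hPref, if_pos rfl]
      push_cast
      ring
    · have hEf : pvE t p i j = false := by simpa using hE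
      have : (PySem.List.pyGet? t (i + (j : Int)) != PySem.List.pyGet? p (j : Int)) = true := by
        simpa [pvE, bne] using hEf
      rw [this]
      simp only [if_true]
      have hz : (List.range' (j + 1) k).countP (pvPref t p i) = 0 := by
        rw [List.countP_eq_zero]
        intro a ha
        have : j + 1 ≤ a := (List.mem_range'_1.mp ha).1
        simp [pvPref_of_lt_false t p i (by omega : j < a) hEf]
      rw [hz, hPref, if_pos rfl]
      push_cast
      ring

-- A as a row sum: Σ_i #{ j < m : pvPref i j }
lemma buscaA_eq (texto padrao : String) :
    busca_ingenua texto padrao =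
      ((PySem.List.pyRange 0 ((texto.toList.length : Int) - (padrao.toList.length : Int) + 1) 1).map
        (fun i => (((List.range padrao.toList.length).countP (pvPref texto.toList padrao.toList i)) : Int))).sum := by
  simp only [busca_ingenua]
  have hcong :
      (PySem.List.pyRange 0 ((texto.toList.length : Int) - (padrao.toList.length : Int) + 1) 1).foldl
          (fun acc i => pvWhileA texto.toList padrao.toList padrao.toList.length i 0 acc) 0
        = (PySem.List.pyRange 0 ((texto.toList.length : Int) - (padrao.toList.length : Int) + 1) 1).foldl
          (fun acc i => acc + (((List.range padrao.toList.length).countP (pvPref texto.toList padrao.toList i)) : Int)) 0 :=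
    PySem.List.foldl_congr_mem _ _ _ _ (by
      intro acc i _
      have := pvWhileA_eq texto.toList padrao.toList i padrao.toList.length padrao.toList.length 0 acc
        (by omega) (by intro j' hj'; omega)
      rw [this, List.range_eq_range'])
  rw [hcong, PySem.List.foldl_add]
  simp

-- B's fold invariant: after processing pattern positions [jstart, jstart+c),
-- the total has grown by the survivor counts and the survivors are the shifts whose prefix still matches
lemma buscaB_inv (t p : List Char) (S0 : List Int) :
    ∀ (c jstart : Nat) (total : Int),
      ((List.range' jstart c).map (fun jn : Nat => (jn : Int))).foldl
        (fun st j =>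
          (st.1 + (st.2.length : Int),
           st.2.filter (fun i => PySem.List.pyGet? t (i + j) == PySem.List.pyGet? p j)))
        (total, S0.filter (fun i => pvPref t p i jstart))
      = (total + ((List.range' jstart c).map
            (fun j : Nat => ((S0.filter (fun i => pvPref t p i j)).length : Int))).sum,
         S0.filter (fun i => pvPref t p i (jstart + c))) := by
  intro c
  induction c with
  | zero => intro jstart total; simp
  | succ c ih =>
    intro jstart total
    rw [List.range'_succ]
    simp only [List.map_cons, List.foldl_cons, List.sum_cons]
    have hstep :
        (S0.filter (fun i => pvPref t p i jstart)).filter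
            (fun i => PySem.List.pyGet? t (i + (jstart : Int)) == PySem.List.pyGet? p (jstart : Int))
          = S0.filter (fun i => pvPref t p i (jstart + 1)) := by
      rw [List.filter_filter]
      apply List.filter_congr
      intro i _
      rw [pvPref_succ]
      exact Bool.and_comm _ _
    rw [hstep, ih (jstart + 1)
      (total + (((S0.filter (fun i => pvPref t p i jstart)).length : Nat) : Int))]
    rw [Prod.mk.injEq]
    refine ⟨by ring, by rw [show jstart + 1 + c = jstart + (c + 1) from by omega]⟩

-- B as a column sum: Σ_{j<m} |surviving shifts at j|
lemma buscaB_eq (texto padrao : String) :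
    busca_ingenua_alt texto padrao =
      ((List.range padrao.toList.length).map
        (fun j => (((PySem.List.pyRange 0 ((texto.toList.length : Int) - (padrao.toList.length : Int) + 1) 1).filter
            (fun i => pvPref texto.toList padrao.toList i j)).length : Int))).sum := by
  simp only [busca_ingenua_alt]
  rw [PySem.List.pyRange_zero_natCast]
  have h0 : (PySem.List.pyRange 0 ((texto.toList.length : Int) - (padrao.toList.length : Int) + 1) 1)
      = (PySem.List.pyRange 0 ((texto.toList.length : Int) - (padrao.toList.length : Int) + 1) 1).filter
          (fun i => pvPref texto.toList padrao.toList i 0) := by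
    simp [pvPref]
  rw [List.range_eq_range']
  conv_lhs => rw [h0]
  rw [buscaB_inv]
  simp

-- double counting: summing rows equals summing columns
lemma sum_countP_swap (I : List Int) (J : List Nat) (P : Int → Nat → Bool) :
    (I.map (fun i => ((J.countP (P i)) : Int))).sum
      = (J.map (fun j => ((I.countP (fun i => P i j)) : Int))).sum := by
  induction I with
  | nil => simp
  | cons a I ih =>
    simp only [List.map_cons, List.sum_cons]
    have : (J.map (fun j => ((List.countP (fun i => P i j) (a :: I)) : Int))).sum
        = (J.map (fun j => (((List.countP (fun i => P i j) I) : Int) + (if P a j = true then 1 else 0)))).sum := by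
      congr 1
      apply List.map_congr_left
      intro j _
      rw [List.countP_cons]
      split_ifs <;> push_cast <;> ring
    rw [this, PySem.List.sum_map_add_int, PySem.List.sum_map_ite_one_zero, ← ih]
    ring

-- ===== VERDICT (by name: the statement is the Claim_ definition above) =====
theorem busca_ingenua_spec : Claim_equal_busca_ingenua := by
  intro texto padrao _
  unfold Spec_busca_ingenua
  rw [buscaA_eq, buscaB_eq]
  rw [sum_countP_swap]
  congr 1
  apply List.map_congr_left
  intro j _
  rw [List.countP_eq_length_filter]
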